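-- pv_equiv track=rewrite | github.com/adanzl/MyTodo | device_agent/core/service/bluetooth_mgr.py | _find_adapter_path
-- ===== SOURCE A (Python) =====
-- from typing import Dict, List, Optional, Any
--
-- ADAPTER_INTERFACE = 'org.bluez.Adapter1'
--
-- def _find_adapter_path(adapter_name: str, objects: Dict) -> Optional[str]:
--     """
--     查找适配器路径
--     :param adapter_name: 适配器名称（如 hci0）
--     :param objects: GetManagedObjects() 返回的对象字典
--     :return: 适配器路径，如果未找到返回 None
--     """
--     # 首先尝试查找指定名称的适配器
--     for path, interfaces in objects.items():
--         if ADAPTER_INTERFACE in interfaces: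
--             adapter_props = interfaces[ADAPTER_INTERFACE]
--             if adapter_props.get('Name', '') == adapter_name:
--                 return path
--
--     # 如果没找到指定适配器，返回第一个适配器
--     for path, interfaces in objects.items():
--         if ADAPTER_INTERFACE in interfaces:
--             return path
--
--     return None
-- ===== SOURCE B (Python) =====
-- from typing import Dict, Optional
--
-- ADAPTER_INTERFACE = 'org.bluez.Adapter1'
--
-- def _find_adapter_path(adapter_name: str, objects: Dict) -> Optional[str]:
--     """Single pass: return on the first name match, else remember the first adapter seen."""
--     first = None
--     for path, interfaces in objects.items():
--         if ADAPTER_INTERFACE in interfaces: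
--             if interfaces[ADAPTER_INTERFACE].get('Name', '') == adapter_name:
--                 return path
--             if first is None:
--                 first = path
--     return first
-- ===== Notes on version B (the rewrite author's own statement) =====
-- stated objective: simpler
-- what changed: Replaces A's two sequential scans of objects by one pass that returns immediately on a name match and keeps a 'first adapter seen' accumulator for the fallback.
import Mathlib
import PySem

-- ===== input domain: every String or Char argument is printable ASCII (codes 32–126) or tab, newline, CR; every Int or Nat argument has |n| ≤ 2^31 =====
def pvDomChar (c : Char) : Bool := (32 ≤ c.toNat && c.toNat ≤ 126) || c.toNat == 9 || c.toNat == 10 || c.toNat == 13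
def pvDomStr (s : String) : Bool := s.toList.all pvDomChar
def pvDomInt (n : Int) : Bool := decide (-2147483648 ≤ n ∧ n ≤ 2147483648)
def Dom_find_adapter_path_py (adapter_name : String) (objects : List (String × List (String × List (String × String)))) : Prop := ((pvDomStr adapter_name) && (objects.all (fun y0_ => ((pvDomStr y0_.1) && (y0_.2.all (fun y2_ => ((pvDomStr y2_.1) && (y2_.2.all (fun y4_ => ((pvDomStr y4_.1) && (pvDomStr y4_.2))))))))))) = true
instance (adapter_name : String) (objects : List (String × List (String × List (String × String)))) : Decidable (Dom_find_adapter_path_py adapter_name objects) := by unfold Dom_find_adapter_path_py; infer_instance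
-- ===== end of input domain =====

-- B collapses A's two sequential scans into a single pass with a 'first adapter seen' accumulator (objective: simpler).

-- ===== PORT A =====
-- first loop of A: return the first adapter path whose 'Name' equals adapter_name
def pvScanName (adapter_name : String) : List (String × List (String × List (String × String))) → Option String
  | [] => none
  | (path, interfaces) :: rest =>
    match (PySem.Dict.mk interfaces).get? "org.bluez.Adapter1" with
    | some props =>
      if (PySem.Dict.mk props).getD "Name" "" == adapter_name then some path
      else pvScanName adapter_name rest
    | none => pvScanName adapter_name rest

-- second loop of A: return the first adapter path
def pvScanFirst : List (String × List (String × List (String × String))) → Option String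
  | [] => none
  | (path, interfaces) :: rest =>
    if ((PySem.Dict.mk interfaces).get? "org.bluez.Adapter1").isSome then some path
    else pvScanFirst rest

def find_adapter_path_py (adapter_name : String) (objects : List (String × List (String × List (String × String)))) : Option String :=
  match pvScanName adapter_name objects with
  | some p => some p
  | none => pvScanFirst objects

-- ===== PORT B =====
-- single pass: return on name match, remember first adapter in 'first'
def pvLoopB (adapter_name : String) (first : Option String) : List (String × List (String × List (String × String))) → Option String
  | [] => first
  | (path, interfaces) :: rest =>
    match (PySem.Dict.mk interfaces).get? "org.bluez.Adapter1" with
    | some props =>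
      if (PySem.Dict.mk props).getD "Name" "" == adapter_name then some path
      else pvLoopB adapter_name (match first with | none => some path | some f => some f) rest
    | none => pvLoopB adapter_name first rest

def find_adapter_path_py_alt (adapter_name : String) (objects : List (String × List (String × List (String × String)))) : Option String :=
  pvLoopB adapter_name none objects

-- ===== PRECONDITION & SPEC =====
def Spec_find_adapter_path_py (adapter_name : String) (objects : List (String × List (String × List (String × String)))) (out : Option String) : Prop := out = find_adapter_path_py_alt adapter_name objects
instance (adapter_name : String) (objects : List (String × List (String × List (String × String)))) (out : Option String) : Decidable (Spec_find_adapter_path_py adapter_name objects out) := by unfold Spec_find_adapter_path_py; infer_instance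

-- ===== CLAIM (what is proved, stated in full; the proofs are below) =====
def Claim_equal_find_adapter_path_py : Prop := ∀ (adapter_name : String) (objects : List (String × List (String × List (String × String)))), Dom_find_adapter_path_py adapter_name objects → Spec_find_adapter_path_py adapter_name objects (find_adapter_path_py adapter_name objects)

-- ===== LEMMAS AND PROOFS =====
theorem pvLoopB_eq (adapter_name : String) (l : List (String × List (String × List (String × String)))) :
    ∀ first : Option String,
      pvLoopB adapter_name first l =
        match pvScanName adapter_name l with
        | some p => some p
        | none => match first with | some f => some f | none => pvScanFirst l := by
  induction l with
  | nil => intro first; cases first <;> simp [pvLoopB, pvScanName, pvScanFirst]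
  | cons hd tl ih =>
    intro first
    obtain ⟨path, interfaces⟩ := hd
    simp only [pvLoopB, pvScanName, pvScanFirst]
    cases hg : (PySem.Dict.mk interfaces).get? "org.bluez.Adapter1" with
    | none => simp [ih first]
    | some props =>
      by_cases hn : ((PySem.Dict.mk props).getD "Name" "" == adapter_name) = true
      · simp [hn]
      · simp only [hn, if_neg, Bool.not_eq_true, Option.isSome_some, if_pos]
        cases first with
        | none => simp [ih (some path)]
        | some f => simp [ih (some f)]

-- ===== VERDICT (by name: the statement is the Claim_ definition above) =====
theorem find_adapter_path_py_spec : Claim_equal_find_adapter_path_py := by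
  intro adapter_name objects _
  unfold Spec_find_adapter_path_py find_adapter_path_py find_adapter_path_py_alt
  rw [pvLoopB_eq]
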